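-- pv_equiv track=rewrite | github.com/MrBrantCode/unitest_baseline | mut_generate/mist_train_cf/cf_30142/solution.py | convolve_1d_with_padding
-- ===== SOURCE A (Python) =====
-- def convolve_1d_with_padding(input_array, kernel_array, padding_type):
--     input_size = len(input_array)
--     kernel_size = len(kernel_array)
--     output_size = input_size if padding_type == "valid" else input_size
--
--     if padding_type == "same":
--         pad_left = (kernel_size - 1) // 2
--         pad_right = kernel_size - 1 - pad_left
--         input_array = [0] * pad_left + input_array + [0] * pad_right
--
--     result = []
--     for i in range(output_size):
--         if i + kernel_size <= len(input_array):
--             result.append(sum(a * b for a, b in zip(input_array[i:i+kernel_size], kernel_array)))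
--         else:
--             break
--
--     return result
-- ===== SOURCE B (Python) =====
-- def convolve_1d_with_padding(input_array, kernel_array, padding_type):
--     n = len(input_array)
--     k = len(kernel_array)
--     if padding_type == "same":
--         pad_left = (k - 1) // 2
--         padded = [0] * pad_left + input_array + [0] * (k - 1 - pad_left)
--         out_len = n
--     else:
--         padded = input_array
--         out_len = max(0, min(n, n - k + 1))
--     result = [0] * out_len
--     for j, kv in enumerate(kernel_array):
--         result = [r + kv * p for r, p in zip(result, padded[j:j + out_len])]
--     return result
-- ===== Notes on version B (the rewrite author's own statement) =====
-- stated objective: alternative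
-- what changed: A gathers each output by slicing a window per index inside a range loop with a break; B computes the output length in closed form and scatters kernel-tap by kernel-tap, accumulating the whole result with one zip pass per kernel element.
import Mathlib
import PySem

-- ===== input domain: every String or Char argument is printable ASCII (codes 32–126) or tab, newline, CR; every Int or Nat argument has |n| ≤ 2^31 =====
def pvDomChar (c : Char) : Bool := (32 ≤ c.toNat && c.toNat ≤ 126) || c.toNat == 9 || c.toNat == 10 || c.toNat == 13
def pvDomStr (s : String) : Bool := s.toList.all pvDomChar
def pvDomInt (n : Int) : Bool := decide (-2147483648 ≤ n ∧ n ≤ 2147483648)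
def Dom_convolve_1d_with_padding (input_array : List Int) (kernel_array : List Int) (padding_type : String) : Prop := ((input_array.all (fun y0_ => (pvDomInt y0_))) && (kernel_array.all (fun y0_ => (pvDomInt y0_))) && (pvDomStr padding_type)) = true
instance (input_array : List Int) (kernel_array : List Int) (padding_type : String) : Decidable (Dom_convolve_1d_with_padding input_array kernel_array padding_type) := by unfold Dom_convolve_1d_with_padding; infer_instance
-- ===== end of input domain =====

-- B replaces A's per-output gather loop (range + break + window slice) by a closed-form output
-- length and a kernel-outer scatter (one zip pass per kernel tap) — an alternative decomposition.

-- ===== PORT A =====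
-- sum(a * b for a, b in zip(window, kernel_array))
def pvSumZipMul (window kern : List Int) : Int :=
  ((window.zip kern).map (fun ab => ab.1 * ab.2)).sum

-- A's `for i in range(output_size)` loop, with its break on the window test
def pvALoop (arr kern : List Int) : List Nat → List Int
  | [] => []
  | i :: rest =>
    if i + kern.length ≤ arr.length then
      pvSumZipMul (PySem.List.slice arr (some (i : Int)) (some ((i : Int) + (kern.length : Int)))) kern
        :: pvALoop arr kern rest
    else []

def convolve_1d_with_padding (input_array : List Int) (kernel_array : List Int) (padding_type : String) : List Int :=
  let input_size := input_array.length
  let kernel_size := kernel_array.length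
  let output_size := if padding_type == "valid" then input_size else input_size
  let arr :=
    if padding_type == "same" then
      List.replicate (PySem.Int.floordiv ((kernel_size : Int) - 1) 2).toNat (0 : Int) ++ input_array
        ++ List.replicate (((kernel_size : Int) - 1) - PySem.Int.floordiv ((kernel_size : Int) - 1) 2).toNat (0 : Int)
    else input_array
  pvALoop arr kernel_array (List.range output_size)

-- ===== PORT B =====
def convolve_1d_with_padding_alt (input_array : List Int) (kernel_array : List Int) (padding_type : String) : List Int :=
  let n := input_array.length
  let k := kernel_array.length
  let st :=  -- (padded, out_len)
    if padding_type == "same" then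
      (List.replicate (PySem.Int.floordiv ((k : Int) - 1) 2).toNat (0 : Int) ++ input_array
        ++ List.replicate (((k : Int) - 1) - PySem.Int.floordiv ((k : Int) - 1) 2).toNat (0 : Int), n)
    else (input_array, (max 0 (min (n : Int) ((n : Int) - (k : Int) + 1))).toNat)
  (PySem.List.enumerate kernel_array).foldl
    (fun res jkv => List.zipWith (fun r p => r + jkv.2 * p) res
      (PySem.List.slice st.1 (some jkv.1) (some (jkv.1 + (st.2 : Int)))))
    (List.replicate st.2 (0 : Int))

-- ===== PRECONDITION & SPEC =====
def Spec_convolve_1d_with_padding (input_array : List Int) (kernel_array : List Int) (padding_type : String) (out : List Int) : Prop := out = convolve_1d_with_padding_alt input_array kernel_array padding_type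
instance (input_array : List Int) (kernel_array : List Int) (padding_type : String) (out : List Int) : Decidable (Spec_convolve_1d_with_padding input_array kernel_array padding_type out) := by unfold Spec_convolve_1d_with_padding; infer_instance

-- ===== CLAIM (what is proved, stated in full; the proofs are below) =====
def Claim_equal_convolve_1d_with_padding : Prop := ∀ (input_array : List Int) (kernel_array : List Int) (padding_type : String), Dom_convolve_1d_with_padding input_array kernel_array padding_type → Spec_convolve_1d_with_padding input_array kernel_array padding_type (convolve_1d_with_padding input_array kernel_array padding_type)

-- ===== LEMMAS AND PROOFS =====

-- dot product of the kernel against `padded` starting at offset p: the common value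
-- A gathers per window and B accumulates tap by tap
def pvDotOff (padded : List Int) (kern : List Int) (p : Nat) : Int :=
  match kern with
  | [] => 0
  | kv :: rest => kv * padded.getD p 0 + pvDotOff padded rest (p + 1)

lemma pvSumZip_eq_dotOff : ∀ (kern arr : List Int) (p : Nat), p + kern.length ≤ arr.length →
    pvSumZipMul ((arr.drop p).take kern.length) kern = pvDotOff arr kern p := by
  intro kern
  induction kern with
  | nil => intro arr p h; simp [pvSumZipMul, pvDotOff]
  | cons kv rest ih =>
    intro arr p h
    have hp : p < arr.length := by simp at h; omega
    rw [List.drop_eq_getElem_cons hp]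
    have h2 : (p + 1) + rest.length ≤ arr.length := by simp at h; omega
    simp only [List.length_cons, List.take_succ_cons, pvSumZipMul, List.zip_cons_cons,
      List.map_cons, List.sum_cons, pvDotOff]
    rw [show (List.take rest.length (arr.drop (p+1))) = ((arr.drop (p+1)).take rest.length) from rfl]
    rw [← pvSumZipMul, ih arr (p+1) h2]
    rw [List.getD_eq_getElem _ _ hp]
    ring

lemma pvALoop_append_all (arr kern : List Int) : ∀ (l1 l2 : List Nat), (∀ i ∈ l1, i + kern.length ≤ arr.length) →
    pvALoop arr kern (l1 ++ l2)
      = l1.map (fun (i : Nat) => pvSumZipMul (PySem.List.slice arr (some (i : Int)) (some ((i : Int) + (kern.length : Int)))) kern)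
        ++ pvALoop arr kern l2 := by
  intro l1
  induction l1 with
  | nil => intro l2 h; simp
  | cons i rest ih =>
    intro l2 h
    have hi : i + kern.length ≤ arr.length := h i (by simp)
    simp only [List.cons_append, pvALoop, if_pos hi, ih l2 (fun j hj => h j (by simp [hj]))]
    rfl

lemma pvA_range_eq (arr kern : List Int) (L n : Nat) (hLn : L ≤ n)
    (hall : ∀ i, i < L → i + kern.length ≤ arr.length)
    (hstop : L < n → ¬ (L + kern.length ≤ arr.length)) :
    pvALoop arr kern (List.range n) = (List.range L).map (fun i => pvDotOff arr kern i) := by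
  have hsplit : List.range n = List.range L ++ (List.range (n - L)).map (fun x => L + x) := by
    rw [← List.range_add]; congr 1; omega
  rw [hsplit, pvALoop_append_all arr kern _ _ (fun i hi => hall i (List.mem_range.mp hi))]
  have htail : pvALoop arr kern ((List.range (n - L)).map (fun x => L + x)) = [] := by
    rcases Nat.eq_zero_or_pos (n - L) with h0 | hpos
    · simp [h0, pvALoop]
    · obtain ⟨m, hm⟩ := Nat.exists_eq_succ_of_ne_zero (Nat.pos_iff_ne_zero.mp hpos)
      rw [hm, List.range_succ_eq_map]
      simp only [List.map_cons, pvALoop, Nat.add_zero]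
      rw [if_neg (hstop (by omega))]
  rw [htail, List.append_nil]
  apply List.map_congr_left
  intro i hi
  have hi' := List.mem_range.mp hi
  have hc := hall i hi'
  rw [PySem.List.slice_natCast_add, pvSumZip_eq_dotOff kern arr i hc]

-- zipWith ignores the tail of its longer second list
lemma pvZipWith_take_right (f : Int → Int → Int) : ∀ (s u : List Int) (L : Nat), s.length ≤ L →
    List.zipWith f s (u.take L) = List.zipWith f s u := by
  intro s
  induction s with
  | nil => intro u L h; simp
  | cons a s ih =>
    intro u L h
    cases u with
    | nil => simp
    | cons b u =>
      cases L with
      | zero => simp at h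
      | succ L => simp only [List.take_succ_cons, List.zipWith_cons_cons, ih u L (by simp at h; omega)]

lemma pvB_fold (padded : List Int) (L : Nat) : ∀ (kern : List Int) (t : Nat) (s : List Int),
    (s.length + t + kern.length ≤ padded.length + 1 ∨ s = []) → s.length ≤ L →
    (PySem.List.enumerate kern (t : Int)).foldl
        (fun res jkv => List.zipWith (fun r p => r + jkv.2 * p) res
          (PySem.List.slice padded (some jkv.1) (some (jkv.1 + (L : Int))))) s
      = s.mapIdx (fun i r => r + pvDotOff padded kern (t + i)) := by
  intro kern
  induction kern with
  | nil =>
    intro t s h hsL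
    simp only [PySem.List.enumerate_nil, List.foldl_nil, pvDotOff]
    apply List.ext_getElem <;> simp [List.getElem_mapIdx]
  | cons kv rest ih =>
    intro t s h hsL
    rcases h with h | rfl
    · simp only [PySem.List.enumerate_cons, List.foldl_cons]
      have hcast : (t : Int) + 1 = ((t + 1 : Nat) : Int) := by push_cast; ring
      rw [hcast, PySem.List.slice_natCast_add, pvZipWith_take_right _ s _ L hsL]
      have hlen : s.length + t ≤ padded.length := by simp at h; omega
      have hs1len : (List.zipWith (fun r p => r + kv * p) s (padded.drop t)).length = s.length := by
        simp; omega
      rw [ih (t + 1) _ (Or.inl (by simp at h ⊢; omega)) (by omega)]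
      apply List.ext_getElem
      · simp [hs1len]
      · intro i hi1 hi2
        simp only [List.length_mapIdx, hs1len] at hi1 hi2
        rw [List.getElem_mapIdx, List.getElem_mapIdx]
        rw [List.getElem_zipWith]
        have hti : t + i < padded.length := by omega
        rw [List.getElem_drop]
        show s[_]'_ + kv * padded[t + i]'hti + pvDotOff padded rest (t + 1 + i)
          = s[_]'_ + (kv * padded.getD (t + i) 0 + pvDotOff padded rest (t + i + 1))
        rw [List.getD_eq_getElem _ _ hti, show t + 1 + i = t + i + 1 from by omega]
        ring
    · simp only [PySem.List.enumerate_cons, List.foldl_cons, List.zipWith_nil_left, List.mapIdx_nil]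
      have hcast : (t : Int) + 1 = ((t + 1 : Nat) : Int) := by push_cast; ring
      rw [hcast, ih (t + 1) [] (Or.inr rfl) (by simp)]
      simp

lemma pvMapIdx_replicate_zero (g : Nat → Int) (L : Nat) :
    (List.replicate L (0 : Int)).mapIdx (fun i r => r + g i) = (List.range L).map g := by
  apply List.ext_getElem
  · simp
  · intro i h1 h2
    simp [List.getElem_mapIdx]

lemma pvMain_eq (input_array : List Int) (kernel_array : List Int) (padding_type : String) :
    convolve_1d_with_padding input_array kernel_array padding_type
      = convolve_1d_with_padding_alt input_array kernel_array padding_type := by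
  have hfd := PySem.Int.floordiv_mul_add_mod ((kernel_array.length : Int) - 1) 2
  have hm0 : 0 ≤ PySem.Int.mod ((kernel_array.length : Int) - 1) 2 :=
    PySem.Int.mod_nonneg _ (by norm_num)
  have hm1 : PySem.Int.mod ((kernel_array.length : Int) - 1) 2 < 2 :=
    PySem.Int.mod_lt _ (by norm_num)
  by_cases hs : (padding_type == "same") = true
  · simp only [convolve_1d_with_padding, convolve_1d_with_padding_alt, if_pos hs, ite_self]
    set n := input_array.length with hn
    set k := kernel_array.length with hk
    set P := List.replicate (PySem.Int.floordiv ((k : Int) - 1) 2).toNat (0 : Int) ++ input_array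
        ++ List.replicate (((k : Int) - 1) - PySem.Int.floordiv ((k : Int) - 1) 2).toNat (0 : Int) with hP
    have hPlen : P.length = (PySem.Int.floordiv ((k : Int) - 1) 2).toNat + n
        + (((k : Int) - 1) - PySem.Int.floordiv ((k : Int) - 1) 2).toNat := by
      simp [hP]; omega
    rw [pvA_range_eq P kernel_array n n le_rfl (by intro i hi; rw [hPlen]; omega) (by omega)]
    have hbf := pvB_fold P n kernel_array 0 (List.replicate n (0:Int))
      (Or.inl (by rw [List.length_replicate, hPlen]; omega)) (by simp)
    rw [Nat.cast_zero] at hbf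
    rw [hbf, pvMapIdx_replicate_zero (fun i => pvDotOff P kernel_array (0 + i)) n]
    exact List.map_congr_left (fun i _ => by rw [Nat.zero_add])
  · simp only [convolve_1d_with_padding, convolve_1d_with_padding_alt, if_neg hs, ite_self]
    set n := input_array.length with hn
    set k := kernel_array.length with hk
    set L := (max 0 (min (n : Int) ((n : Int) - (k : Int) + 1))).toNat with hL
    rw [pvA_range_eq input_array kernel_array L n (by omega) (by intro i hi; omega) (by omega)]
    have hB : (List.replicate L (0:Int)).length + 0 + k ≤ n + 1 ∨ List.replicate L (0:Int) = [] := by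
      rcases Nat.eq_zero_or_pos L with h0 | hpos
      · right; rw [h0]; rfl
      · left; rw [List.length_replicate]; omega
    have hbf := pvB_fold input_array L kernel_array 0 (List.replicate L (0:Int)) hB (by simp)
    rw [Nat.cast_zero] at hbf
    rw [hbf, pvMapIdx_replicate_zero (fun i => pvDotOff input_array kernel_array (0 + i)) L]
    exact List.map_congr_left (fun i _ => by rw [Nat.zero_add])

-- ===== VERDICT (by name: the statement is the Claim_ definition above) =====
theorem convolve_1d_with_padding_spec : Claim_equal_convolve_1d_with_padding := by
  intro input_array kernel_array padding_type _
  exact pvMain_eq input_array kernel_array padding_type
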